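-- pv_equiv track=rewrite | github.com/srana6/interview-prep | personal/two_sigma_hackerrank.py | bfs
-- ===== SOURCE A (Python) =====
-- from collections import deque
-- from collections import deque
--
-- def bfs(start, words):
--     chain = 0
--     queue = deque([(start, 1)])
--
--     while queue:
--         word, length = queue.popleft()
--
--         chain = max(chain, length)
--
--         w_size = len(word)
--         for i in range(w_size):
--             substring = word[:i] + word[i + 1:]
--             if substring in words:
--                 queue.append((substring, length + 1))
--
--     return chain
-- ===== SOURCE B (Python) =====
-- def bfs(start, words):
--     memo = {}
--
--     def longest(word):
--         if word in memo:
--             return memo[word]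
--         best = 0
--         for i in range(len(word)):
--             sub = word[:i] + word[i + 1:]
--             if sub in words:
--                 c = longest(sub)
--                 if c > best:
--                     best = c
--         memo[word] = best + 1
--         return best + 1
--
--     return longest(start)
-- ===== Notes on version B (the rewrite author's own statement) =====
-- stated objective: alternative
-- what changed: Replaced the BFS over a deque of (word, chain-length) pairs, which re-explores every deletion path, by a memoized recursive DP that caches the longest chain per word and visits each reachable word once.
import Mathlib
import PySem

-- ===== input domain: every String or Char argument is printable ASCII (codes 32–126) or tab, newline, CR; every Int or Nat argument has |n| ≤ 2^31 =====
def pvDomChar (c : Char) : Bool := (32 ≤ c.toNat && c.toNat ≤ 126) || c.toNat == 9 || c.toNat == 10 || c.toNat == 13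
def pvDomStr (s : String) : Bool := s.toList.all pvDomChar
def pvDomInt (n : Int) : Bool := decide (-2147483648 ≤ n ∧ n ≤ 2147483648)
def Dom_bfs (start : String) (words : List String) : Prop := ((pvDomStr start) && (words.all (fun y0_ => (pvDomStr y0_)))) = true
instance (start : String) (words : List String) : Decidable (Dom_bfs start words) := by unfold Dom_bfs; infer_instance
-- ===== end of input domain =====

-- B replaces A's BFS over a deque of deletion paths by a memoized depth-first DP
-- caching the longest chain per word; same return value on every input.
-- Strings are handled as their code-point lists (the PySem.Chars convention);
-- `word[:i] + word[i+1:]` is PySem.List.slice ++ PySem.List.slice, which is exact.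

-- the Python expression `word[:i] + word[i+1:]` (used by both programs)
def pyDel (w : List Char) (i : Int) : List Char :=
  PySem.List.slice w none (some i) ++ PySem.List.slice w (some (i + 1)) none

theorem pyDel_length (w : List Char) (i : Int) (h0 : 0 ≤ i) (h1 : i < (w.length : Int)) :
    (pyDel w i).length = w.length - 1 := by
  unfold pyDel
  rw [PySem.List.slice_to w h0, PySem.List.slice_from w (show (0:Int) ≤ i + 1 by omega)]
  simp [List.length_take, List.length_drop]
  omega

-- ===== PORT A =====

-- termination measure for A's queue: Σ (len(word)+1)!
def qMeasure (q : List (List Char × Int)) : Nat :=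
  (q.map (fun p => Nat.factorial (p.1.length + 1))).sum

theorem qMeasure_foldl_push (ws : List (List Char)) (word : List Char) (length : Int) :
    ∀ (idxs : List Int) (rest : List (List Char × Int)),
      (∀ i ∈ idxs, 0 ≤ i ∧ i < (word.length : Int)) →
      qMeasure (idxs.foldl
        (fun q i => if ws.contains (pyDel word i) then q ++ [(pyDel word i, length + 1)] else q)
        rest)
        ≤ qMeasure rest + idxs.length * Nat.factorial word.length := by
  intro idxs
  induction idxs with
  | nil => intro rest _; simp
  | cons i t ih =>
    intro rest h
    have hi := h i (List.mem_cons_self)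
    have hlen : (pyDel word i).length = word.length - 1 := pyDel_length word i hi.1 hi.2
    have hpos : 1 ≤ word.length := by omega
    simp only [List.foldl_cons]
    by_cases hc : ws.contains (pyDel word i)
    · have := ih (rest ++ [(pyDel word i, length + 1)]) (fun j hj => h j (List.mem_cons_of_mem _ hj))
      simp only [hc, if_pos]
      have hq : qMeasure (rest ++ [(pyDel word i, length + 1)])
          = qMeasure rest + Nat.factorial word.length := by
        simp [qMeasure, hlen]
        have hx : word.length - 1 + 1 = word.length := by omega
        rw [hx]
      rw [hq] at this
      calc _ ≤ qMeasure rest + Nat.factorial word.length + t.length * Nat.factorial word.length := this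
        _ = qMeasure rest + (t.length + 1) * Nat.factorial word.length := by ring
        _ = _ := by simp [List.length_cons]
    · have := ih rest (fun j hj => h j (List.mem_cons_of_mem _ hj))
      simp only [hc]
      simp only [List.length_cons]
      calc _ ≤ qMeasure rest + t.length * Nat.factorial word.length := this
        _ ≤ _ := by nlinarith [Nat.factorial_pos word.length]

theorem bfs_push_measure_lt (ws : List (List Char)) (word : List Char) (length : Int)
    (rest : List (List Char × Int)) :
    qMeasure ((PySem.List.pyRange 0 (word.length : Int) 1).foldl
      (fun q i => if ws.contains (pyDel word i) then q ++ [(pyDel word i, length + 1)] else q)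
      rest)
      < qMeasure ((word, length) :: rest) := by
  have hb : ∀ i ∈ PySem.List.pyRange 0 (word.length : Int) 1, 0 ≤ i ∧ i < (word.length : Int) := by
    intro i hi; exact (PySem.List.mem_pyRange_one.mp hi)
  have h := qMeasure_foldl_push ws word length _ rest hb
  have hlen : (PySem.List.pyRange 0 (word.length : Int) 1).length = word.length := by
    simp [PySem.List.length_pyRange_one]
  rw [hlen] at h
  have hfac : word.length * Nat.factorial word.length < Nat.factorial (word.length + 1) := by
    rw [Nat.factorial_succ]
    have := Nat.factorial_pos word.length
    nlinarith
  calc _ ≤ qMeasure rest + word.length * Nat.factorial word.length := h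
    _ < qMeasure rest + Nat.factorial (word.length + 1) := by omega
    _ = qMeasure ((word, length) :: rest) := by simp [qMeasure]; ring

-- the while loop of A; the deque is a list (popleft = head, append = tail);
-- the inner `for i in range(w_size)` with its conditional appends is the foldl
def bfsLoop (ws : List (List Char)) (queue : List (List Char × Int)) (chain : Int) : Int :=
  match queue with
  | [] => chain
  | (word, length) :: rest =>
    bfsLoop ws
      ((PySem.List.pyRange 0 (word.length : Int) 1).foldl
        (fun q i => if ws.contains (pyDel word i) then q ++ [(pyDel word i, length + 1)] else q)
        rest)
      (max chain length)
termination_by qMeasure queue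
decreasing_by exact bfs_push_measure_lt ws word length rest

def bfs (start : String) (words : List String) : Int :=
  bfsLoop (words.map String.toList) [(start.toList, 1)] 0

-- ===== PORT B =====

-- memoized DP: longest(word) = 1 + best over one-char deletions that are in words,
-- with the memo dict threaded through (port of Source B's `memo` / nested `longest`);
-- `h` carries the range bounds of the loop indices (for termination only)
mutual
def altLoop (ws : List (List Char)) (word : List Char) (idxs : List Int)
    (h : ∀ i ∈ idxs, 0 ≤ i ∧ i < (word.length : Int))
    (best : Int) (memo : PySem.Dict (List Char) Int) : Int × PySem.Dict (List Char) Int :=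
  match idxs, h with
  | [], _ => (best, memo)
  | i :: rest, h =>
    if ws.contains (pyDel word i) then
      altLoop ws word rest (fun j hj => h j (List.mem_cons_of_mem _ hj))
        (if best < (altLongest ws (pyDel word i) memo).1
          then (altLongest ws (pyDel word i) memo).1 else best)
        (altLongest ws (pyDel word i) memo).2
    else
      altLoop ws word rest (fun j hj => h j (List.mem_cons_of_mem _ hj)) best memo
termination_by (word.length, 0, idxs.length)
decreasing_by
  · have hi := h i (List.mem_cons_self)
    have := pyDel_length word i hi.1 hi.2
    have hpos : 1 ≤ word.length := by omega
    apply Prod.Lex.left; omega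
  · apply Prod.Lex.right; apply Prod.Lex.right; simp
  · apply Prod.Lex.right; apply Prod.Lex.right; simp

def altLongest (ws : List (List Char)) (word : List Char)
    (memo : PySem.Dict (List Char) Int) : Int × PySem.Dict (List Char) Int :=
  match memo.get? word with
  | some v => (v, memo)
  | none =>
    ((altLoop ws word (PySem.List.pyRange 0 (word.length : Int) 1)
        (fun i hi => PySem.List.mem_pyRange_one.mp hi) 0 memo).1 + 1,
      (altLoop ws word (PySem.List.pyRange 0 (word.length : Int) 1)
        (fun i hi => PySem.List.mem_pyRange_one.mp hi) 0 memo).2.insert word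
        ((altLoop ws word (PySem.List.pyRange 0 (word.length : Int) 1)
          (fun i hi => PySem.List.mem_pyRange_one.mp hi) 0 memo).1 + 1))
termination_by (word.length, 1, 0)
decreasing_by
  all_goals (apply Prod.Lex.right; exact Prod.Lex.left _ _ (by omega))
end

def bfs_alt (start : String) (words : List String) : Int :=
  (altLongest (words.map String.toList) start.toList PySem.Dict.empty).1

-- ===== PRECONDITION & SPEC =====
def Spec_bfs (start : String) (words : List String) (out : Int) : Prop := out = bfs_alt start words
instance (start : String) (words : List String) (out : Int) : Decidable (Spec_bfs start words out) := by unfold Spec_bfs; infer_instance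

-- ===== CLAIM (what is proved, stated in full; the proofs are below) =====
def Claim_equal_bfs : Prop := ∀ (start : String) (words : List String), Dom_bfs start words → Spec_bfs start words (bfs start words)

-- ===== LEMMAS AND PROOFS =====

-- the chain value both programs compute: depth w = 1 + best over valid one-char deletions
def depthF (ws : List (List Char)) : Nat → List Char → Int
  | 0, _ => 1
  | fuel + 1, w =>
    1 + (PySem.List.pyRange 0 (w.length : Int) 1).foldl
      (fun b i => if ws.contains (pyDel w i) then max b (depthF ws fuel (pyDel w i)) else b) 0

def depth (ws : List (List Char)) (w : List Char) : Int := depthF ws (w.length + 1) w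

theorem depthF_congr (ws : List (List Char)) :
    ∀ f1 f2 (w : List Char), w.length < f1 → w.length < f2 →
      depthF ws f1 w = depthF ws f2 w := by
  intro f1
  induction f1 with
  | zero => intro f2 w h1 _; omega
  | succ f1 ih =>
    intro f2 w h1 h2
    match f2, h2 with
    | f2 + 1, h2 =>
      simp only [depthF]
      congr 1
      apply PySem.List.foldl_congr_mem
      intro acc i hi
      have hb := PySem.List.mem_pyRange_one.mp hi
      have hlen := pyDel_length w i hb.1 hb.2
      have hpos : 1 ≤ w.length := by omega
      rw [ih f2 (pyDel w i) (by omega) (by omega)]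

theorem depth_eq (ws : List (List Char)) (w : List Char) :
    depth ws w = 1 + (PySem.List.pyRange 0 (w.length : Int) 1).foldl
      (fun b i => if ws.contains (pyDel w i) then max b (depth ws (pyDel w i)) else b) 0 := by
  unfold depth
  conv_lhs => rw [depthF]
  congr 1
  apply PySem.List.foldl_congr_mem
  intro acc i hi
  have hb := PySem.List.mem_pyRange_one.mp hi
  have hlen := pyDel_length w i hb.1 hb.2
  have hpos : 1 ≤ w.length := by omega
  rw [depthF_congr ws w.length ((pyDel w i).length + 1) (pyDel w i) (by omega) (by omega)]

theorem le_foldl_step (f : Int → Int → Int) (hf : ∀ b i, b ≤ f b i) :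
    ∀ (idxs : List Int) (b : Int), b ≤ idxs.foldl f b := by
  intro idxs
  induction idxs with
  | nil => intro b; simp
  | cons i t ih =>
    intro b
    simp only [List.foldl_cons]
    exact le_trans (hf b i) (ih (f b i))

theorem one_le_depth (ws : List (List Char)) (w : List Char) : 1 ≤ depth ws w := by
  rw [depth_eq]
  have h := le_foldl_step
    (fun b i => if ws.contains (pyDel w i) then max b (depth ws (pyDel w i)) else b)
    (fun b i => by
      dsimp only
      split
      · exact le_max_left _ _
      · exact le_refl b)
    (PySem.List.pyRange 0 (w.length : Int) 1) 0
  omega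

-- pulling a max out of a fold's initial value, for any fold step that respects max
theorem foldl_init_max (f : Int → Int → Int)
    (hf : ∀ c d i, f (max c d) i = max c (f d i)) :
    ∀ (idxs : List Int) (c d : Int), idxs.foldl f (max c d) = max c (idxs.foldl f d) := by
  intro idxs
  induction idxs with
  | nil => intro c d; simp
  | cons i t ih =>
    intro c d
    simp only [List.foldl_cons, hf]
    exact ih c (f d i)

-- two max-respecting folds over independent lists commute through the accumulator
theorem foldl_swap (f : Int → Int → Int)
    (hf : ∀ c d i, f (max c d) i = max c (f d i)) :
    ∀ (xs idxs : List Int) (c : Int),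
      idxs.foldl f (xs.foldl max c) = xs.foldl max (idxs.foldl f c) := by
  intro xs
  induction xs with
  | nil => intro idxs c; simp
  | cons x t ih =>
    intro idxs c
    simp only [List.foldl_cons]
    calc idxs.foldl f (t.foldl max (max c x))
        = t.foldl max (idxs.foldl f (max c x)) := ih idxs (max c x)
      _ = t.foldl max (max x (idxs.foldl f c)) := by
            rw [max_comm c x, foldl_init_max f hf]
      _ = t.foldl max (max (idxs.foldl f c) x) := by rw [max_comm]

-- the inner for-loop's step respects max
theorem bstep_respects_max (ws : List (List Char)) (w : List Char) (l : Int) :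
    ∀ c d i : Int,
      (fun b i => if ws.contains (pyDel w i) then max b (l + depth ws (pyDel w i)) else b) (max c d) i
      = max c ((fun b i => if ws.contains (pyDel w i) then max b (l + depth ws (pyDel w i)) else b) d i) := by
  intro c d i
  dsimp only
  split
  · exact max_assoc c d _
  · rfl

theorem foldl_shift (ws : List (List Char)) (w : List Char) (l : Int) :
    ∀ (idxs : List Int) (b0 : Int),
      idxs.foldl
        (fun b i => if ws.contains (pyDel w i) then max b (l + depth ws (pyDel w i)) else b) (l + b0)
      = l + idxs.foldl
          (fun b i => if ws.contains (pyDel w i) then max b (depth ws (pyDel w i)) else b) b0 := by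
  intro idxs
  induction idxs with
  | nil => intro b0; simp
  | cons i t ih =>
    intro b0
    simp only [List.foldl_cons]
    split
    · rw [max_add_add_left l b0 (depth ws (pyDel w i))]
      exact ih (max b0 (depth ws (pyDel w i)))
    · exact ih b0

-- pushes of one popped word, seen through the chain-value map
theorem push_vs_best (ws : List (List Char)) (w : List Char) (l : Int) :
    ∀ (idxs : List Int) (q0 : List (List Char × Int)) (c : Int),
      ((idxs.foldl
        (fun q i => if ws.contains (pyDel w i) then q ++ [(pyDel w i, l + 1)] else q) q0).map
        (fun p => p.2 - 1 + depth ws p.1)).foldl max c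
      = idxs.foldl
          (fun b i => if ws.contains (pyDel w i) then max b (l + depth ws (pyDel w i)) else b)
          ((q0.map (fun p => p.2 - 1 + depth ws p.1)).foldl max c) := by
  intro idxs
  induction idxs with
  | nil => intro q0 c; simp
  | cons i t ih =>
    intro q0 c
    simp only [List.foldl_cons]
    split
    · rw [ih (q0 ++ [(pyDel w i, l + 1)]) c]
      congr 1
      rw [List.map_append, List.foldl_append]
      simp only [List.map_cons, List.map_nil, List.foldl_cons, List.foldl_nil]
      congr 1
      ring
    · exact ih q0 c

theorem bfsLoop_eq (ws : List (List Char)) :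
    ∀ (n : Nat) (queue : List (List Char × Int)) (chain : Int), qMeasure queue ≤ n →
      bfsLoop ws queue chain
        = (queue.map (fun p => p.2 - 1 + depth ws p.1)).foldl max chain := by
  intro n
  induction n using Nat.strong_induction_on with
  | _ n ih =>
    intro queue chain hq
    match queue with
    | [] => rw [bfsLoop]; simp
    | (w, l) :: rest =>
      rw [bfsLoop]
      have hm := bfs_push_measure_lt ws w l rest
      rw [ih (qMeasure ((PySem.List.pyRange 0 (w.length : Int) 1).foldl
            (fun q i => if ws.contains (pyDel w i) then q ++ [(pyDel w i, l + 1)] else q) rest))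
          (by omega) _ (max chain l) le_rfl]
      rw [push_vs_best ws w l]
      rw [foldl_swap _ (bstep_respects_max ws w l)]
      simp only [List.map_cons, List.foldl_cons]
      congr 1
      rw [foldl_init_max _ (bstep_respects_max ws w l)]
      congr 1
      have h0 := foldl_shift ws w l (PySem.List.pyRange 0 (w.length : Int) 1) 0
      rw [add_zero] at h0
      rw [h0, depth_eq ws w]
      ring

-- B side: the memo only ever stores correct depths
def MemoInv (ws : List (List Char)) (memo : PySem.Dict (List Char) Int) : Prop :=
  ∀ w v, memo.get? w = some v → v = depth ws w

theorem altLoop_spec (ws : List (List Char)) (w : List Char)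
    (hIH : ∀ w', w'.length < w.length → ∀ memo, MemoInv ws memo →
      (altLongest ws w' memo).1 = depth ws w' ∧ MemoInv ws (altLongest ws w' memo).2) :
    ∀ (idxs : List Int) (h : ∀ i ∈ idxs, 0 ≤ i ∧ i < (w.length : Int)) (best : Int)
      (memo : PySem.Dict (List Char) Int), MemoInv ws memo →
      (altLoop ws w idxs h best memo).1
        = idxs.foldl
            (fun b i => if ws.contains (pyDel w i) then max b (depth ws (pyDel w i)) else b) best
      ∧ MemoInv ws (altLoop ws w idxs h best memo).2 := by
  intro idxs
  induction idxs with
  | nil => intro h best memo hm; rw [altLoop]; exact ⟨rfl, hm⟩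
  | cons i t ih =>
    intro h best memo hm
    have hi := h i (List.mem_cons_self)
    have hlen : (pyDel w i).length = w.length - 1 := pyDel_length w i hi.1 hi.2
    have hpos : 1 ≤ w.length := by omega
    have hsub := hIH (pyDel w i) (by omega) memo hm
    rw [altLoop]
    simp only [List.foldl_cons]
    split
    · have hbest : (if best < (altLongest ws (pyDel w i) memo).1
          then (altLongest ws (pyDel w i) memo).1 else best)
          = max best (depth ws (pyDel w i)) := by
        rw [hsub.1]
        by_cases hb : best < depth ws (pyDel w i)
        · simp only [hb, if_pos]
          exact (max_eq_right (le_of_lt hb)).symm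
        · simp only [hb, if_false]
          exact (max_eq_left (not_lt.mp hb)).symm
      rw [hbest]
      exact ih (fun j hj => h j (List.mem_cons_of_mem _ hj))
        (max best (depth ws (pyDel w i))) _ hsub.2
    · exact ih (fun j hj => h j (List.mem_cons_of_mem _ hj)) best memo hm

theorem alt_spec (ws : List (List Char)) :
    ∀ (n : Nat) (w : List Char), w.length < n →
      ∀ memo, MemoInv ws memo →
        (altLongest ws w memo).1 = depth ws w ∧ MemoInv ws (altLongest ws w memo).2 := by
  intro n
  induction n using Nat.strong_induction_on with
  | _ n ih =>
    intro w hw memo hm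
    rw [altLongest]
    cases hget : memo.get? w with
    | some v => exact ⟨hm w v hget, hm⟩
    | none =>
      have hIH : ∀ w', w'.length < w.length → ∀ memo, MemoInv ws memo →
          (altLongest ws w' memo).1 = depth ws w' ∧ MemoInv ws (altLongest ws w' memo).2 :=
        fun w' hl memo hm => ih w.length hw w' hl memo hm
      have hr := altLoop_spec ws w hIH (PySem.List.pyRange 0 (w.length : Int) 1)
        (fun i hi => PySem.List.mem_pyRange_one.mp hi) 0 memo hm
      have hval : (altLoop ws w (PySem.List.pyRange 0 (w.length : Int) 1)
          (fun i hi => PySem.List.mem_pyRange_one.mp hi) 0 memo).1 + 1 = depth ws w := by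
        rw [hr.1, depth_eq ws w]; ring
      refine ⟨hval, ?_⟩
      intro w' v hv
      simp only at hv
      by_cases he : w' = w
      · subst he
        rw [PySem.Dict.get?_insert_self] at hv
        have hv' := Option.some.inj hv
        rw [← hv', hval]
      · rw [PySem.Dict.get?_insert_of_ne _ _ he] at hv
        exact hr.2 w' v hv

-- ===== VERDICT (by name: the statement is the Claim_ definition above) =====
theorem bfs_spec : Claim_equal_bfs := by
  intro start words _
  unfold Spec_bfs bfs bfs_alt
  rw [bfsLoop_eq (words.map String.toList) (qMeasure [(start.toList, 1)]) _ 0 le_rfl]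
  have hd := one_le_depth (words.map String.toList) start.toList
  have ha := alt_spec (words.map String.toList) (start.toList.length + 1) start.toList
    (by omega) PySem.Dict.empty
    (by intro w v hv; simp [PySem.Dict.get?_empty] at hv)
  rw [ha.1]
  simp only [List.map_cons, List.map_nil, List.foldl_cons, List.foldl_nil]
  omega
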